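-- pv_equiv track=rewrite | github.com/JEMAA-Youssef/r-seaux_personnages | generate_submission.py | resolve_aliases
-- ===== SOURCE A (Python) =====
-- def resolve_aliases(characters: list[str]) -> dict[str, set[str]]:
--     """
--     Regroupe les noms de personnages en alias.
--
--     Stratégie simple : un nom plus court est considéré comme un alias d'un nom
--     plus long s'il en est une sous-partie.
--     Exemple: "Hari" et "Seldon" deviennent des alias de "Hari Seldon".
--
--     Returns:
--         Un dictionnaire où la clé est le nom canonique (le plus long) et la
--         valeur est un ensemble de tous ses alias.
--     """
--     alias_map = {}
--     # La liste est triée par longueur (décroissante), donc on rencontre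
--     # toujours le nom le plus long en premier.
--     for name in characters:
--         is_alias = False
--         for canonical_name in alias_map:
--             # Si "Hari" est dans "Hari Seldon"
--             if f" {name} " in f" {canonical_name} ":
--                 alias_map[canonical_name].add(name)
--                 is_alias = True
--                 break
--         if not is_alias:
--             alias_map[name] = {name}
--     return alias_map
-- ===== SOURCE B (Python) =====
-- def resolve_aliases(characters: list[str]) -> dict[str, set[str]]:
--     """Same grouping as A, but with an index of every space-bounded substring
--     of each canonical name mapped to its earliest canonical, so each name is
--     resolved by one dict lookup instead of a scan over all canonicals."""
--     alias_map = {}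
--     index = {}  # space-bounded substring -> earliest canonical containing it
--     for name in characters:
--         canon = index.get(name)
--         if canon is not None:
--             alias_map[canon].add(name)
--         else:
--             alias_map[name] = {name}
--             n = len(name)
--             for i in range(n + 1):
--                 if i == 0 or name[i - 1] == ' ':
--                     for j in range(i, n + 1):
--                         if j == n or name[j] == ' ':
--                             index.setdefault(name[i:j], name)
--     return alias_map
-- ===== Notes on version B (the rewrite author's own statement) =====
-- stated objective: faster
-- what changed: Instead of scanning all existing canonical names per input name with a substring test, B maintains a dictionary mapping every space-bounded substring of each canonical to its earliest canonical, so each name is resolved by a single dict lookup.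
import Mathlib
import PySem

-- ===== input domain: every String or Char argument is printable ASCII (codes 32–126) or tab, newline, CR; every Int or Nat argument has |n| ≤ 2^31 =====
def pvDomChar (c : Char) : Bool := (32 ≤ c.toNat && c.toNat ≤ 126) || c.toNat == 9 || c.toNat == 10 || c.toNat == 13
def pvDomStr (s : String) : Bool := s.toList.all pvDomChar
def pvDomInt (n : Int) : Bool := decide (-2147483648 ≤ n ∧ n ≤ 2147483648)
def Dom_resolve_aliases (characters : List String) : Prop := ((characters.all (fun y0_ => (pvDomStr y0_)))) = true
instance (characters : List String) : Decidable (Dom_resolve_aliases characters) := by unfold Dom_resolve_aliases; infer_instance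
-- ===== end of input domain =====

-- B replaces A's scan over all existing canonicals per name by a dictionary indexing
-- every space-bounded substring of each canonical to its earliest canonical (one lookup per name).

-- ===== PORT A =====
-- f" {s} " on the List Char side
def pvPad (s : List Char) : List Char := ' ' :: s ++ [' ']

-- the test  f" {name} " in f" {canonical} "
def pvMatches (nm c : List Char) : Bool := PySem.Chars.isIn (pvPad nm) (pvPad c)

-- A's inner 'for canonical_name in alias_map: … break'
def pvFindCanonical : List String → String → Option String
  | [], _ => none
  | k :: ks, nm => if pvMatches nm.toList k.toList then some k else pvFindCanonical ks nm

def pvStepA (d : PySem.Dict String (PySem.Set String)) (nm : String) :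
    PySem.Dict String (PySem.Set String) :=
  match pvFindCanonical d.keys nm with
  | some k => d.modify k PySem.Set.empty (fun s => PySem.Set.add s nm)
  | none => d.insert nm (PySem.Set.ofList [nm])

def resolve_aliases (characters : List String) : List (String × List String) :=
  (characters.foldl pvStepA PySem.Dict.empty).items

-- ===== PORT B =====
-- 'i == 0 or name[i-1] == " "'
def pvBStart (cs : List Char) (i : Int) : Bool :=
  i == 0 || PySem.List.pyGet? cs (i - 1) == some ' '

-- 'j == n or name[j] == " "'
def pvBEnd (cs : List Char) (j : Int) : Bool :=
  j == (cs.length : Int) || PySem.List.pyGet? cs j == some ' '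

-- B's double loop filling the index for a fresh canonical name
def pvIndexSubs (idx : PySem.Dict (List Char) String) (nm : String) :
    PySem.Dict (List Char) String :=
  let cs := nm.toList
  let n : Int := (cs.length : Int)
  (PySem.List.pyRange 0 (n + 1)).foldl (fun idx i =>
    if pvBStart cs i then
      (PySem.List.pyRange i (n + 1)).foldl (fun idx j =>
        if pvBEnd cs j then
          idx.setdefault (PySem.List.slice cs (some i) (some j)) nm
        else idx) idx
    else idx) idx

def pvStepB (st : PySem.Dict String (PySem.Set String) × PySem.Dict (List Char) String)
    (nm : String) :
    PySem.Dict String (PySem.Set String) × PySem.Dict (List Char) String :=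
  match st.2.get? nm.toList with
  | some canon => (st.1.modify canon PySem.Set.empty (fun s => PySem.Set.add s nm), st.2)
  | none => (st.1.insert nm (PySem.Set.ofList [nm]), pvIndexSubs st.2 nm)

def resolve_aliases_alt (characters : List String) : List (String × List String) :=
  (characters.foldl pvStepB (PySem.Dict.empty, PySem.Dict.empty)).1.items

-- ===== PRECONDITION & SPEC =====
def Spec_resolve_aliases (characters : List String) (out : List (String × List String)) : Prop := out = resolve_aliases_alt characters
instance (characters : List String) (out : List (String × List String)) : Decidable (Spec_resolve_aliases characters out) := by unfold Spec_resolve_aliases; infer_instance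

-- ===== CLAIM (what is proved, stated in full; the proofs are below) =====
def Claim_equal_resolve_aliases : Prop := ∀ (characters : List String), Dom_resolve_aliases characters → Spec_resolve_aliases characters (resolve_aliases characters)

-- ===== LEMMAS AND PROOFS =====

-- A's inner loop is a find? over the keys
def pvFirst (ks : List String) (s : List Char) : Option String :=
  ks.find? (fun k => pvMatches s k.toList)

theorem pvFindCanonical_eq (ks : List String) (nm : String) :
    pvFindCanonical ks nm = pvFirst ks nm.toList := by
  induction ks with
  | nil => rfl
  | cons k t ih => simp [pvFindCanonical, pvFirst, List.find?] at ih ⊢; split <;> simp_all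

-- "s is a space-bounded contiguous substring of c"
def pvSubAt (c s : List Char) (i j : Nat) : Prop :=
  i ≤ j ∧ j ≤ c.length ∧ (i = 0 ∨ getElem? c (i-1) = some ' ') ∧
    (j = c.length ∨ getElem? c j = some ' ') ∧ s = (c.drop i).take (j - i)

def pvSub (c s : List Char) : Prop := ∃ i j, pvSubAt c s i j

-- Boolean form of pvSub (kept an explicit Bool: no extra Decidable instances)
def pvSubB (c s : List Char) : Bool :=
  (List.range (c.length + 1)).any fun i =>
    (List.range (c.length + 1)).any fun j =>
      decide (i ≤ j) && (i == 0 || getElem? c (i - 1) == some ' ') &&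
        (j == c.length || getElem? c j == some ' ') &&
        (s == (c.drop i).take (j - i))

theorem pvSubB_iff (c s : List Char) : pvSubB c s = true ↔ pvSub c s := by
  simp only [pvSubB, List.any_eq_true, List.mem_range, Bool.and_eq_true, Bool.or_eq_true,
    beq_iff_eq, decide_eq_true_eq]
  constructor
  · rintro ⟨i, _, j, hj, ⟨⟨hij, hbs⟩, hbe⟩, hs⟩
    exact ⟨i, j, hij, by omega, hbs, hbe, hs⟩
  · rintro ⟨i, j, hij, hjn, hbs, hbe, hs⟩
    exact ⟨i, by omega, j, by omega, ⟨⟨hij, hbs⟩, hbe⟩, hs⟩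

-- ===== the core string lemma: the padded-substring test ≡ space-bounded slice =====

-- one space-terminated word-prefix equation pins down the slice and the end boundary
theorem pvKey (c' s v : List Char) (h : s ++ [' '] ++ v = c' ++ [' ']) :
    s = c'.take s.length ∧ (s.length = c'.length ∨ getElem? c' s.length = some ' ') := by
  have hlen := congrArg List.length h
  simp only [List.length_append, List.length_cons, List.length_nil] at hlen
  have hle : s.length ≤ c'.length := by omega
  constructor
  · have ht := congrArg (List.take s.length) h
    rw [List.append_assoc, List.take_left, List.take_append_of_le_length hle] at ht
    exact ht
  · rcases Nat.lt_or_ge s.length c'.length with hlt | hge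
    · right
      have hd := congrArg (List.drop s.length) h
      rw [List.append_assoc, List.drop_left, List.drop_append_of_le_length hle,
        List.drop_eq_getElem_cons hlt] at hd
      rw [List.cons_append] at hd
      injection hd with h1 _
      rw [List.getElem?_eq_getElem hlt, h1]
    · exact Or.inl (by omega)

-- c.drop shifts one space off at a start boundary
theorem pvDropBoundary (c : List Char) (i : Nat) (hi : 1 ≤ i) (hin : i ≤ c.length)
    (hg : getElem? c (i - 1) = some ' ') :
    (pvPad c).drop i = ' ' :: (c.drop i ++ [' ']) := by
  have hlt : i - 1 < c.length := by omega
  obtain ⟨hlt', heq⟩ := List.getElem?_eq_some_iff.mp hg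
  show (' ' :: (c ++ [' '])).drop i = _
  rw [show i = (i - 1) + 1 by omega]
  rw [List.drop_succ_cons, List.drop_append_of_le_length (by omega),
    List.drop_eq_getElem_cons hlt, heq]
  simp [show i - 1 + 1 = i from by omega]

theorem pvSub_iff_matches (c s : List Char) : pvMatches s c = true ↔ pvSub c s := by
  rw [pvMatches, PySem.Chars.isIn_iff_infix]
  constructor
  · rintro ⟨u, v, hP⟩
    rcases u with _ | ⟨ch, u'⟩
    · -- occurrence at the very start
      simp only [pvPad, List.nil_append, List.cons_append, List.append_assoc] at hP
      injection hP with _ he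
      have hkey := pvKey c s v (by rw [List.append_assoc]; exact he)
      have hlen := congrArg List.length he
      simp only [List.length_append, List.length_cons, List.length_nil] at hlen
      refine ⟨0, s.length, Nat.zero_le _, by omega, Or.inl rfl, hkey.2, ?_⟩
      simpa using hkey.1
    · -- occurrence after a prefix u = ch :: u'
      simp only [pvPad, List.cons_append, List.append_assoc] at hP
      injection hP with _ he
      -- he : u' ++ ((' ' :: (s ++ [' '])) ++ v) = c ++ [' ']  (up to assoc)
      have hlen := congrArg List.length he
      simp only [List.length_append, List.length_cons, List.length_nil] at hlen
      have hlt : u'.length < c.length := by omega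
      have hbs : getElem? c u'.length = some ' ' := by
        have hg := congrArg (fun l => getElem? l u'.length) he
        simp only at hg
        rw [List.getElem?_append_right (Nat.le_refl _)] at hg
        simp only [Nat.sub_self] at hg
        rw [List.getElem?_append_left hlt] at hg
        rw [← hg]
        rfl
      have hdrop := congrArg (List.drop u'.length) he
      rw [List.drop_left, List.drop_append_of_le_length (Nat.le_of_lt hlt),
        List.drop_eq_getElem_cons hlt] at hdrop
      obtain ⟨hlt2, heq⟩ := List.getElem?_eq_some_iff.mp hbs
      rw [heq, List.cons_append] at hdrop
      injection hdrop with _ he2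
      -- he2 : (s ++ [' ']) ++ v = c.drop (u'.length + 1) ++ [' ']
      have hkey := pvKey (c.drop (u'.length + 1)) s v (by rw [List.append_assoc]; exact he2)
      refine ⟨u'.length + 1, u'.length + 1 + s.length, by omega, by omega, ?_, ?_, ?_⟩
      · exact Or.inr (by simpa using hbs)
      · rcases hkey.2 with h1 | h2
        · rw [List.length_drop] at h1
          exact Or.inl (by omega)
        · rw [List.getElem?_drop] at h2
          exact Or.inr h2
      · have := hkey.1
        simpa [Nat.add_sub_cancel_left] using this
  · rintro ⟨i, j, hij, hjn, hbs, hbe, hs⟩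
    have hdropP : (pvPad c).drop i = ' ' :: (c.drop i ++ [' ']) := by
      rcases Nat.eq_zero_or_pos i with rfl | hpos
      · simp [pvPad]
      · rcases hbs with h0 | hg
        · omega
        · exact pvDropBoundary c i hpos (by omega) hg
    have hsplit : ∃ vv, c.drop i ++ [' '] = (s ++ [' ']) ++ vv := by
      rcases hbe with rfl | hg
      · refine ⟨[], ?_⟩
        have hseq : s = c.drop i := by
          rw [hs, show c.length - i = (c.drop i).length from by rw [List.length_drop]]
          exact List.take_length
        rw [← hseq, List.append_nil]
      · obtain ⟨hjlt, hcj⟩ := List.getElem?_eq_some_iff.mp hg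
        refine ⟨c.drop (j + 1) ++ [' '], ?_⟩
        have hdd : c.drop i = s ++ c.drop j := by
          conv_lhs => rw [← List.take_append_drop (j - i) (c.drop i)]
          rw [← hs, List.drop_drop]
          congr 2
          omega
        rw [hdd, List.drop_eq_getElem_cons hjlt, hcj]
        simp
    obtain ⟨vv, hvv⟩ := hsplit
    refine ⟨(pvPad c).take i, vv, ?_⟩
    conv_rhs => rw [← List.take_append_drop i (pvPad c)]
    rw [hdropP, hvv]
    simp [pvPad]

-- pvMatches is reflexive (the full slice)
theorem pvMatches_self (s : List Char) : pvMatches s s = true := by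
  simp [pvMatches, PySem.Chars.isIn_iff_infix]

-- ===== characterising B's index loops =====

theorem get?_inner (cs : List Char) (nm : String) (i : Int) (js : List Int)
    (idx : PySem.Dict (List Char) String) (s : List Char) :
    (js.foldl (fun idx j =>
        if pvBEnd cs j then idx.setdefault (PySem.List.slice cs (some i) (some j)) nm
        else idx) idx).get? s =
      ((idx.get? s).or
        (if js.any (fun j => pvBEnd cs j &&
              (s == PySem.List.slice cs (some i) (some j))) = true
         then some nm else none)) := by
  induction js generalizing idx with
  | nil => simp
  | cons j t ih =>
    simp only [List.foldl_cons, List.any_cons]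
    by_cases hb : pvBEnd cs j = true
    · simp only [hb, if_true]
      rw [ih]
      by_cases hs : s = PySem.List.slice cs (some i) (some j)
      · subst hs
        rw [PySem.Dict.get?_setdefault_self]
        have hcond : (true && (PySem.List.slice cs (some i) (some j) ==
              PySem.List.slice cs (some i) (some j)) ||
            (t.any fun j' => pvBEnd cs j' && (PySem.List.slice cs (some i) (some j) ==
              PySem.List.slice cs (some i) (some j')))) = true := by simp
        rw [hcond, if_pos rfl]
        cases h : (idx.get? (PySem.List.slice cs (some i) (some j))) <;> simp [Option.or]
      · rw [PySem.Dict.get?_setdefault_of_ne _ _ hs]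
        have hh : (s == PySem.List.slice cs (some i) (some j)) = false := by simp [hs]
        rw [hh, Bool.and_false, Bool.false_or]
    · rw [Bool.not_eq_true] at hb
      simp only [hb, Bool.false_and, Bool.false_or, Bool.false_eq_true, if_false]
      rw [ih]

theorem get?_outer (cs : List Char) (nm : String) (n : Int) (is : List Int)
    (idx : PySem.Dict (List Char) String) (s : List Char) :
    ((is.foldl (fun idx i =>
        if pvBStart cs i then
          (PySem.List.pyRange i (n + 1)).foldl (fun idx j =>
            if pvBEnd cs j then
              idx.setdefault (PySem.List.slice cs (some i) (some j)) nm
            else idx) idx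
        else idx) idx).get? s) =
      ((idx.get? s).or
        (if is.any (fun i => pvBStart cs i &&
              (PySem.List.pyRange i (n + 1)).any (fun j => pvBEnd cs j &&
                (s == PySem.List.slice cs (some i) (some j)))) = true
         then some nm else none)) := by
  induction is generalizing idx with
  | nil => simp
  | cons i t ih =>
    simp only [List.foldl_cons, List.any_cons]
    by_cases hb : pvBStart cs i = true
    · simp only [hb, if_true]
      rw [ih, get?_inner, Option.or_assoc]
      congr 1
      by_cases hj : (PySem.List.pyRange i (n + 1)).any (fun j => pvBEnd cs j &&
          (s == PySem.List.slice cs (some i) (some j))) = true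
      · rw [if_pos hj]
        simp only [Option.some_or]
        rw [if_pos (by simp [hj])]
      · rw [if_neg hj, Option.none_or]
        rw [Bool.not_eq_true] at hj
        rw [hj, Bool.and_false, Bool.false_or]
    · rw [Bool.not_eq_true] at hb
      simp only [hb, Bool.false_and, Bool.false_or, Bool.false_eq_true, if_false]
      rw [ih]

-- the double loop's condition, read arithmetically, is pvSub
theorem pvLoopCond_iff_pvSub (cs s : List Char) :
    ((PySem.List.pyRange 0 ((cs.length : Int) + 1)).any (fun i => pvBStart cs i &&
        (PySem.List.pyRange i ((cs.length : Int) + 1)).any (fun j => pvBEnd cs j &&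
          (s == PySem.List.slice cs (some i) (some j)))) = true) ↔ pvSub cs s := by
  simp only [List.any_eq_true, Bool.and_eq_true, beq_iff_eq]
  constructor
  · rintro ⟨i, hi, hsi, j, hj, hsj, hs⟩
    rw [PySem.List.mem_pyRange_one] at hi hj
    obtain ⟨a, rfl⟩ : ∃ a : Nat, i = (a : Int) := ⟨i.toNat, by omega⟩
    obtain ⟨b, rfl⟩ : ∃ b : Nat, j = (b : Int) := ⟨j.toNat, by omega⟩
    have hab : a ≤ b := by omega
    have hbl : b ≤ cs.length := by omega
    refine ⟨a, b, hab, hbl, ?_, ?_, ?_⟩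
    · rcases Nat.eq_zero_or_pos a with rfl | hpos
      · exact Or.inl rfl
      · simp only [pvBStart, Bool.or_eq_true, beq_iff_eq] at hsi
        rcases hsi with h0 | hg
        · omega
        · right
          rw [show (a : Int) - 1 = ((a - 1 : Nat) : Int) by omega,
            PySem.List.pyGet?_natCast] at hg
          exact hg
    · simp only [pvBEnd, Bool.or_eq_true, beq_iff_eq] at hsj
      rcases hsj with h0 | hg
      · exact Or.inl (by omega)
      · exact Or.inr (by rw [PySem.List.pyGet?_natCast] at hg; exact hg)
    · rw [hs, PySem.List.slice_natCast]
  · rintro ⟨a, b, hab, hbl, hsa, hsb, hs⟩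
    refine ⟨(a : Int), by rw [PySem.List.mem_pyRange_one]; omega,
      ?_, (b : Int), by rw [PySem.List.mem_pyRange_one]; omega, ?_, ?_⟩
    · simp only [pvBStart, Bool.or_eq_true, beq_iff_eq]
      rcases Nat.eq_zero_or_pos a with rfl | hpos
      · exact Or.inl rfl
      · rcases hsa with h0 | hg
        · omega
        · right
          rw [show (a : Int) - 1 = ((a - 1 : Nat) : Int) by omega,
            PySem.List.pyGet?_natCast]
          exact hg
    · simp only [pvBEnd, Bool.or_eq_true, beq_iff_eq]
      rcases hsb with rfl | hg
      · exact Or.inl rfl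
      · exact Or.inr (by rw [PySem.List.pyGet?_natCast]; exact hg)
    · rw [PySem.List.slice_natCast]; exact hs

theorem get?_pvIndexSubs (idx : PySem.Dict (List Char) String) (nm : String) (s : List Char) :
    (pvIndexSubs idx nm).get? s =
      (idx.get? s).or (if pvSubB nm.toList s = true then some nm else none) := by
  unfold pvIndexSubs
  rw [get?_outer]
  congr 1
  by_cases h : pvSub nm.toList s
  · rw [if_pos ((pvLoopCond_iff_pvSub nm.toList s).mpr h), if_pos ((pvSubB_iff _ _).mpr h)]
  · rw [if_neg (fun hc => h ((pvLoopCond_iff_pvSub nm.toList s).mp hc)),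
      if_neg (fun hb => h ((pvSubB_iff _ _).mp hb))]

-- ===== the main loop invariant =====

def pvInv (d : PySem.Dict String (PySem.Set String)) (idx : PySem.Dict (List Char) String) : Prop :=
  ∀ s : List Char, idx.get? s = pvFirst d.keys s

theorem pvStep_eq (p : PySem.Dict String (PySem.Set String) × PySem.Dict (List Char) String)
    (nm : String) (h : pvInv p.1 p.2) :
    pvStepA p.1 nm = (pvStepB p nm).1 ∧ pvInv (pvStepB p nm).1 (pvStepB p nm).2 := by
  obtain ⟨d, idx⟩ := p
  have hA : pvFindCanonical d.keys nm = idx.get? nm.toList := by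
    rw [pvFindCanonical_eq, h]
  cases hg : idx.get? nm.toList with
  | some canon =>
    have hmem : canon ∈ d.keys := List.mem_of_find?_eq_some ((h nm.toList).symm.trans hg)
    have hkeys : (d.modify canon PySem.Set.empty (fun s => PySem.Set.add s nm)).keys = d.keys := by
      rw [PySem.Dict.keys_modify, PySem.Dict.keys_insert_of_contains]
      rw [PySem.Dict.contains_eq_decide_mem_keys]
      exact decide_eq_true hmem
    refine ⟨?_, ?_⟩
    · simp only [pvStepA, pvStepB, hA, hg]
    · intro s
      simp only [pvStepB, hg]
      rw [hkeys]
      exact h s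
  | none =>
    have hnotmem : nm ∉ d.keys := by
      intro hmem
      have : d.keys.find? (fun k => pvMatches nm.toList k.toList) ≠ none := by
        intro hnone
        have := List.find?_eq_none.mp hnone nm hmem
        simp [pvMatches_self] at this
      exact this ((h nm.toList).symm.trans hg)
    have hkeys : (d.insert nm (PySem.Set.ofList [nm])).keys = d.keys ++ [nm] := by
      apply PySem.Dict.keys_insert_of_not_contains
      rw [PySem.Dict.contains_eq_decide_mem_keys]
      exact decide_eq_false hnotmem
    refine ⟨?_, ?_⟩
    · simp only [pvStepA, pvStepB, hA, hg]
    · intro s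
      simp only [pvStepB, hg]
      rw [get?_pvIndexSubs, h s, hkeys]
      unfold pvFirst
      rw [List.find?_append]
      congr 1
      have hms : pvSubB nm.toList s = pvMatches s nm.toList := by
        by_cases h' : pvSub nm.toList s
        · rw [(pvSub_iff_matches nm.toList s).mpr h', (pvSubB_iff nm.toList s).mpr h']
        · rw [Bool.eq_false_iff.mpr (fun hb => h' ((pvSubB_iff nm.toList s).mp hb)),
            Bool.eq_false_iff.mpr (fun hm => h' ((pvSub_iff_matches nm.toList s).mp hm))]
      rw [hms]
      by_cases hm : pvMatches s nm.toList = true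
      · rw [if_pos hm]
        simp [List.find?, hm]
      · rw [if_neg hm]
        simp [List.find?, Bool.eq_false_iff.mpr hm]

theorem pvFold_eq (characters : List String)
    (p : PySem.Dict String (PySem.Set String) × PySem.Dict (List Char) String)
    (h : pvInv p.1 p.2) :
    characters.foldl pvStepA p.1 = (characters.foldl pvStepB p).1 := by
  induction characters generalizing p with
  | nil => rfl
  | cons nm t ih =>
    obtain ⟨h1, h2⟩ := pvStep_eq p nm h
    simp only [List.foldl_cons, h1]
    exact ih (pvStepB p nm) h2

-- ===== VERDICT (by name: the statement is the Claim_ definition above) =====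
theorem resolve_aliases_spec : Claim_equal_resolve_aliases := by
  intro characters _
  unfold Spec_resolve_aliases resolve_aliases resolve_aliases_alt
  rw [pvFold_eq characters (PySem.Dict.empty, PySem.Dict.empty)
    (fun s => by simp [PySem.Dict.get?_empty, pvFirst, PySem.Dict.keys_empty])]
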